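-- pv_equiv track=rewrite | github.com/Chopinsky/auto_correct | resources/pre-processor.py | words_in_one_edit
-- ===== SOURCE A (Python) =====
-- ALPHABET = "abcdefghijklmnopqrstuvwxyz"
--
-- def words_in_one_edit(source, dict, find_all):
--     result = set()
--     length = len(source)
--
--     for i in range(length+1):
--         if length > 1:
--             # delete...
--             delete = source[0:i] + source[i+1:]
--             check_and_add(delete, source, dict, result, find_all)
--
--             # swap...
--             if i+2 <= length:
--                 swap = source[0:i] + source[i+1] + source[i] + source[i+2:]
--                 check_and_add(swap, source, dict, result, find_all)
--
--         for letter in ALPHABET: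
--             # insert...
--             insert = source[0:i] + letter + source[i:]
--             check_and_add(insert, source, dict, result, find_all)
--
--             # replace...
--             replace = source[0:i] + letter + source[i+1:]
--             check_and_add(replace, source, dict, result, find_all)
--
--     return result
--
-- def check_and_add(target, source, dict, result, find_all):
--     if target != source and target not in result:
--         if find_all or target in dict:
--             result.add(target)
-- ===== SOURCE B (Python) =====
-- ALPHABET = "abcdefghijklmnopqrstuvwxyz"
--
--
-- def _head_edits(right, big):
--     # edits that touch the first character of `right` (`big` = the whole word has >1 char):
--     # drop it, swap it with the next one, insert a letter before it, replace it by a letter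
--     out = []
--     if big and right:
--         out.append(right[1:])
--         if len(right) > 1:
--             out.append(right[1] + right[0] + right[2:])
--     for c in ALPHABET:
--         out.append(c + right)
--         out.append(c + right[1:])
--     return out
--
--
-- def _edits1(left, right, big):
--     # structural recursion on the unprocessed suffix: the one-edit variants of left+right that
--     # keep `left` intact are `left` glued to the edits touching the head of `right`, plus the
--     # variants that keep left+right[0] intact, obtained by recursing with the head consumed
--     here = [left + e for e in _head_edits(right, big)]
--     if not right:
--         return here
--     return here + _edits1(left + right[0], right[1:], big)
--
--
-- def words_in_one_edit(source, dict, find_all):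
--     candidates = _edits1("", source, len(source) > 1)
--     return {w for w in candidates if w != source and (find_all or w in dict)}
-- ===== Notes on version B (the rewrite author's own statement) =====
-- stated objective: alternative
-- what changed: B replaces A's index loop that re-slices the whole source on both sides of every split by a structural recursion on the unprocessed suffix (edits touching the head of the suffix under the accumulated prefix, then recurse with the head consumed), with the result set built in one final filter pass over the candidate list instead of A's mutating check_and_add seen-set.
import Mathlib
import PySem

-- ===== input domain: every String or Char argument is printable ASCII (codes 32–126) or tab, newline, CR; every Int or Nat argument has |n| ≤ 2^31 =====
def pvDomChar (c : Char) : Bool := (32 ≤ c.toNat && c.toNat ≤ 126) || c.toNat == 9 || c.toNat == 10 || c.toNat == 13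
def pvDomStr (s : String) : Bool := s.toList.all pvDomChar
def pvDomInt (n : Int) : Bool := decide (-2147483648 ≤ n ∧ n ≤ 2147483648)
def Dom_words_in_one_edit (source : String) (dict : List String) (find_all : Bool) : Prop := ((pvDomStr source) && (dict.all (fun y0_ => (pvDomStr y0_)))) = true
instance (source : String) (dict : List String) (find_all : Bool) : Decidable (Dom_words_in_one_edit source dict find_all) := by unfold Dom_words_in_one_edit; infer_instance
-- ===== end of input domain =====

-- B recurses on the string structure ("edits of s = edits touching the head, plus s[0] prepended
-- to the edits of the tail") and filters the candidate list once at the end; A loops over split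
-- indices, re-slicing the whole source for every candidate, and mutates a seen-set via
-- check_and_add. Same return value (a set) everywhere.

def pvAlphabet : List Char := "abcdefghijklmnopqrstuvwxyz".toList

-- ===== PORT A =====
-- check_and_add: mutates the result set; ported as a function returning the new set
def pvCheckAndAdd (target source : List Char) (dict : List (List Char)) (result : PySem.Set (List Char)) (find_all : Bool) : PySem.Set (List Char) :=
  if target ≠ source ∧ target ∉ result then
    if find_all = true ∨ target ∈ dict then PySem.Set.add result target else result
  else result

def words_in_one_edit (source : String) (dict : List String) (find_all : Bool) : List String :=
  let src := source.toList
  let dictL := dict.map String.toList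
  let length : Int := src.length
  let result := (PySem.List.pyRange 0 (length + 1) 1).foldl (fun result i =>
    let result :=
      if length > 1 then
        -- delete...
        let del := PySem.List.slice src (some 0) (some i) ++ PySem.List.slice src (some (i + 1)) none
        let result := pvCheckAndAdd del src dictL result find_all
        -- swap...  (source[i+1], source[i] are in range under the guard i+2 <= length)
        if i + 2 ≤ length then
          let swp := PySem.List.slice src (some 0) (some i)
            ++ [PySem.List.pyGetD src (i + 1) ' '] ++ [PySem.List.pyGetD src i ' ']
            ++ PySem.List.slice src (some (i + 2)) none
          pvCheckAndAdd swp src dictL result find_all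
        else result
      else result
    pvAlphabet.foldl (fun result letter =>
      -- insert...
      let ins := PySem.List.slice src (some 0) (some i) ++ [letter] ++ PySem.List.slice src (some i) none
      let result := pvCheckAndAdd ins src dictL result find_all
      -- replace...
      let rep := PySem.List.slice src (some 0) (some i) ++ [letter] ++ PySem.List.slice src (some (i + 1)) none
      pvCheckAndAdd rep src dictL result find_all) result) PySem.Set.empty
  result.map String.ofList

-- ===== PORT B =====
-- _head_edits: the edits touching the first character of `right`; slices right[1:], right[2:]
-- of a nonnegative index ported as List.drop, right[0]/right[1] (guarded in range) as getD
def pvHeadEdits (right : List Char) (big : Bool) : List (List Char) :=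
  (if big = true ∧ right ≠ [] then
      right.drop 1 ::
        (if 1 < right.length then [[right.getD 1 ' ', right.getD 0 ' '] ++ right.drop 2] else [])
    else [])
  ++ pvAlphabet.flatMap (fun c => [c :: right, c :: right.drop 1])

-- _edits1: structural recursion on the unprocessed suffix, left accumulated
def pvEdits1 (left right : List Char) (big : Bool) : List (List Char) :=
  match right with
  | [] => (pvHeadEdits [] big).map (fun e => left ++ e)
  | r0 :: rest =>
      (pvHeadEdits (r0 :: rest) big).map (fun e => left ++ e) ++ pvEdits1 (left ++ [r0]) rest big

def words_in_one_edit_alt (source : String) (dict : List String) (find_all : Bool) : List String :=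
  let src := source.toList
  let dictL := dict.map String.toList
  let candidates := pvEdits1 [] src (decide (1 < src.length))
  (PySem.Set.ofList (candidates.filter (fun w => decide (w ≠ src) && (find_all || decide (w ∈ dictL))))).map String.ofList

-- ===== PRECONDITION & SPEC =====
def Spec_words_in_one_edit (source : String) (dict : List String) (find_all : Bool) (out : List String) : Prop := out = words_in_one_edit_alt source dict find_all
instance (source : String) (dict : List String) (find_all : Bool) (out : List String) : Decidable (Spec_words_in_one_edit source dict find_all out) := by unfold Spec_words_in_one_edit; infer_instance

-- ===== CLAIM (what is proved, stated in full; the proofs are below) =====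
def Claim_equal_words_in_one_edit : Prop := ∀ (source : String) (dict : List String) (find_all : Bool), Dom_words_in_one_edit source dict find_all → Spec_words_in_one_edit source dict find_all (words_in_one_edit source dict find_all)

-- ===== LEMMAS AND PROOFS =====

-- the filter/insert condition of check_and_add, with the redundant "not already in result" test dropped
abbrev pvKeep (src : List Char) (dictL : List (List Char)) (find_all : Bool) (t : List Char) : Prop :=
  t ≠ src ∧ (find_all = true ∨ t ∈ dictL)

def pvStep (src : List Char) (dictL : List (List Char)) (find_all : Bool)
    (r : PySem.Set (List Char)) (t : List Char) : PySem.Set (List Char) :=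
  if pvKeep src dictL find_all t then PySem.Set.add r t else r

-- check_and_add's "target not in result" test is redundant because Set.add is idempotent
lemma pvCheckAndAdd_eq_step (t src : List Char) (dictL : List (List Char))
    (r : PySem.Set (List Char)) (f : Bool) :
    pvCheckAndAdd t src dictL r f = pvStep src dictL f r t := by
  unfold pvCheckAndAdd pvStep pvKeep
  by_cases hm : t ∈ r
  · simp only [hm, not_true_eq_false, and_false, if_false]
    split_ifs
    · exact (PySem.Set.add_of_mem hm).symm
    · rfl
  · simp only [hm, not_false_eq_true, and_true]
    split_ifs <;> first | rfl | tauto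

lemma pvFoldl_pairs {σ τ γ : Type} (step : σ → τ → σ) (f g : γ → τ) :
    ∀ (l : List γ) (s : σ),
      l.foldl (fun r c => step (step r (f c)) (g c)) s
        = (l.flatMap (fun c => [f c, g c])).foldl step s := by
  intro l
  induction l with
  | nil => intro s; rfl
  | cons c cs ih => intro s; simp only [List.foldl_cons, List.flatMap_cons, List.foldl_append,
      List.foldl_cons, List.foldl_nil, ih]

lemma pvFoldl_blocks {σ ι τ : Type} (step : σ → τ → σ) (g : ι → List τ) :
    ∀ (l : List ι) (s : σ),
      l.foldl (fun r i => (g i).foldl step r) s = (l.flatMap g).foldl step s := by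
  intro l
  induction l with
  | nil => intro s; rfl
  | cons c cs ih => intro s; simp only [List.foldl_cons, List.flatMap_cons, List.foldl_append, ih]

lemma pvFoldl_ite_add (src : List Char) (dictL : List (List Char)) (f : Bool) :
    ∀ (l : List (List Char)) (s : PySem.Set (List Char)),
      l.foldl (pvStep src dictL f) s
        = (l.filter (fun t => decide (pvKeep src dictL f t))).foldl PySem.Set.add s := by
  intro l
  induction l with
  | nil => intro s; rfl
  | cons c cs ih =>
      intro s
      rw [List.foldl_cons, ih, List.filter_cons]
      by_cases h : pvKeep src dictL f c
      · rw [decide_eq_true h, if_pos rfl, List.foldl_cons]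
        unfold pvStep
        rw [if_pos h]
      · rw [decide_eq_false h]
        unfold pvStep
        rw [if_neg h]
        simp

-- A's candidate edits at split point i, exactly as A slices them
def pvEditsA (src : List Char) (i : Int) : List (List Char) :=
  (if (src.length : Int) > 1 then
      (PySem.List.slice src (some 0) (some i) ++ PySem.List.slice src (some (i + 1)) none) ::
      (if i + 2 ≤ (src.length : Int) then
        [PySem.List.slice src (some 0) (some i)
          ++ [PySem.List.pyGetD src (i + 1) ' '] ++ [PySem.List.pyGetD src i ' ']
          ++ PySem.List.slice src (some (i + 2)) none] else [])
    else [])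
  ++ pvAlphabet.flatMap (fun c =>
      [PySem.List.slice src (some 0) (some i) ++ [c] ++ PySem.List.slice src (some i) none,
       PySem.List.slice src (some 0) (some i) ++ [c] ++ PySem.List.slice src (some (i + 1)) none])

-- A's loop body over one split point folds exactly its candidate list
lemma pvBodyA (src : List Char) (dictL : List (List Char)) (f : Bool)
    (r : PySem.Set (List Char)) (i : Int) :
    (let r' :=
      if (src.length : Int) > 1 then
        let del := PySem.List.slice src (some 0) (some i) ++ PySem.List.slice src (some (i + 1)) none
        let r' := pvCheckAndAdd del src dictL r f
        if i + 2 ≤ (src.length : Int) then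
          let swp := PySem.List.slice src (some 0) (some i)
            ++ [PySem.List.pyGetD src (i + 1) ' '] ++ [PySem.List.pyGetD src i ' ']
            ++ PySem.List.slice src (some (i + 2)) none
          pvCheckAndAdd swp src dictL r' f
        else r'
      else r
    pvAlphabet.foldl (fun r' letter =>
      let ins := PySem.List.slice src (some 0) (some i) ++ [letter] ++ PySem.List.slice src (some i) none
      let r'' := pvCheckAndAdd ins src dictL r' f
      let rep := PySem.List.slice src (some 0) (some i) ++ [letter] ++ PySem.List.slice src (some (i + 1)) none
      pvCheckAndAdd rep src dictL r'' f) r')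
    = (pvEditsA src i).foldl (pvStep src dictL f) r := by
  simp only [pvCheckAndAdd_eq_step, pvEditsA]
  rw [pvFoldl_pairs (pvStep src dictL f)
    (fun c => PySem.List.slice src (some 0) (some i) ++ [c] ++ PySem.List.slice src (some i) none)
    (fun c => PySem.List.slice src (some 0) (some i) ++ [c] ++ PySem.List.slice src (some (i + 1)) none)]
  split_ifs with h1 h2 <;>
    simp only [List.foldl_append, List.foldl_cons, List.foldl_nil]

-- B's recursion unrolled: pvEdits1 is the head-edit lists of every suffix, each under its prefix
lemma pvEdits1_eq_flatMap (big : Bool) :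
    ∀ (right left : List Char),
      pvEdits1 left right big
        = (List.range (right.length + 1)).flatMap
            (fun i => (pvHeadEdits (right.drop i) big).map (fun e => (left ++ right.take i) ++ e)) := by
  intro right
  induction right with
  | nil => intro left; simp [pvEdits1, List.range_succ]
  | cons r0 rest ih =>
      intro left
      rw [pvEdits1, ih (left ++ [r0])]
      conv_rhs => rw [show (r0 :: rest).length + 1 = (rest.length + 1) + 1 from rfl,
        List.range_succ_eq_map, List.flatMap_cons, List.flatMap_map]
      congr 1
      · simp
      · refine List.flatMap_congr (fun i hi => ?_)
        simp [Nat.succ_eq_add_one, List.append_assoc]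

-- A's candidate list at split k, filtered, equals B's prefixed head-edit list at k, filtered,
-- for any filter rejecting src itself (A's "delete" at k = length re-produces src; B omits it)
lemma pvEditsA_filter_eq (src : List Char) (k : Nat) (hk : k ≤ src.length)
    (p : List Char → Bool) (hp : p src = false) :
    (pvEditsA src (k : Int)).filter p
      = ((pvHeadEdits (src.drop k) (decide (1 < src.length))).map (fun e => src.take k ++ e)).filter p := by
  unfold pvEditsA pvHeadEdits
  have h1 : ((k : Int) + 1) = ((k + 1 : Nat) : Int) := by norm_cast
  have h2 : ((k : Int) + 2) = ((k + 2 : Nat) : Int) := by norm_cast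
  rw [h1, h2]
  simp only [PySem.List.slice_zero_start, PySem.List.slice_to_natCast,
    PySem.List.slice_from_natCast, PySem.List.pyGetD_natCast]
  have hdrop1 : (src.drop k).drop 1 = src.drop (k + 1) := by rw [List.drop_drop]
  have hdrop2 : (src.drop k).drop 2 = src.drop (k + 2) := by rw [List.drop_drop]
  have hget0 : (src.drop k).getD 0 ' ' = src.getD k ' ' := by
    simp [List.getD_eq_getElem?_getD, List.getElem?_drop]
  have hget1 : (src.drop k).getD 1 ' ' = src.getD (k + 1) ' ' := by
    simp [List.getD_eq_getElem?_getD, List.getElem?_drop]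
  have hguard : (((k + 2 : Nat) : Int) ≤ (src.length : Int)) ↔ (1 < (src.drop k).length) := by
    rw [List.length_drop]; omega
  have hbig : ((src.length : Int) > 1) ↔ (decide (1 < src.length) = true) := by
    rw [decide_eq_true_iff]; omega
  have hmapflat : ∀ (l : List Char),
      (pvAlphabet.flatMap (fun c => [c :: src.drop k, c :: l])).map (fun e => src.take k ++ e)
        = pvAlphabet.flatMap (fun c =>
            [src.take k ++ [c] ++ src.drop k, src.take k ++ [c] ++ l]) := by
    intro l
    rw [List.map_flatMap]
    refine List.flatMap_congr (fun c hc => ?_)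
    simp [List.append_assoc]
  rw [hdrop1]
  by_cases hb : (src.length : Int) > 1
  · rw [if_pos hb]
    by_cases hke : k = src.length
    · -- at the last split A's "delete" is src itself; p drops it
      subst hke
      have hde : src.drop src.length = ([] : List Char) := by simp
      have hg : ¬ (((src.length + 2 : Nat) : Int) ≤ (src.length : Int)) := by push_cast; omega
      rw [if_neg hg, if_neg (fun h => h.2 hde)]
      have hsrc : src.take src.length ++ src.drop (src.length + 1) = src := by simp
      simp only [List.cons_append, List.nil_append]
      rw [hsrc, hmapflat (src.drop (src.length + 1)), List.filter_cons, hp]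
      simp
    · have hklt : k < src.length := lt_of_le_of_ne hk hke
      have hne : src.drop k ≠ [] := by
        intro h
        have := congrArg List.length h
        simp only [List.length_drop, List.length_nil] at this
        omega
      rw [if_pos (show decide (1 < src.length) = true ∧ src.drop k ≠ [] from ⟨hbig.mp hb, hne⟩),
        hdrop2, hget0, hget1]
      refine congrArg (List.filter p) ?_
      rw [List.map_append, hmapflat (src.drop (k + 1))]
      congr 1
      by_cases hg : (((k + 2 : Nat) : Int) ≤ (src.length : Int))
      · rw [if_pos hg, if_pos (hguard.mp hg)]
        simp [List.append_assoc]
      · rw [if_neg hg, if_neg (fun h => hg (hguard.mpr h))]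
        simp
  · rw [if_neg hb, if_neg (fun h => hb (hbig.mpr h.1)), List.nil_append, List.nil_append,
      hmapflat (src.drop (k + 1))]

-- the two Bool filter conditions coincide
lemma pvFilter_cond (src : List Char) (dictL : List (List Char)) (f : Bool) (w : List Char) :
    (decide (w ≠ src) && (f || decide (w ∈ dictL))) = decide (pvKeep src dictL f w) := by
  unfold pvKeep
  by_cases h1 : w = src <;> by_cases h2 : f = true <;> by_cases h3 : w ∈ dictL <;>
    simp [h1, h2, h3]

-- ===== VERDICT (by name: the statement is the Claim_ definition above) =====
theorem words_in_one_edit_spec : Claim_equal_words_in_one_edit := by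
  intro source dict find_all _
  unfold Spec_words_in_one_edit words_in_one_edit words_in_one_edit_alt
  simp only []
  set src := source.toList with hsrc
  set dictL := dict.map String.toList with hdictL
  congr 1
  -- A's outer fold, with each body folded over its candidate list
  have hbody :
      (fun (r : PySem.Set (List Char)) (i : Int) =>
        (let r' :=
          if (src.length : Int) > 1 then
            let del := PySem.List.slice src (some 0) (some i) ++ PySem.List.slice src (some (i + 1)) none
            let r' := pvCheckAndAdd del src dictL r find_all
            if i + 2 ≤ (src.length : Int) then
              let swp := PySem.List.slice src (some 0) (some i)
                ++ [PySem.List.pyGetD src (i + 1) ' '] ++ [PySem.List.pyGetD src i ' ']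
                ++ PySem.List.slice src (some (i + 2)) none
              pvCheckAndAdd swp src dictL r' find_all
            else r'
          else r
        pvAlphabet.foldl (fun r' letter =>
          let ins := PySem.List.slice src (some 0) (some i) ++ [letter] ++ PySem.List.slice src (some i) none
          let r'' := pvCheckAndAdd ins src dictL r' find_all
          let rep := PySem.List.slice src (some 0) (some i) ++ [letter] ++ PySem.List.slice src (some (i + 1)) none
          pvCheckAndAdd rep src dictL r'' find_all) r'))
      = (fun r i => (pvEditsA src i).foldl (pvStep src dictL find_all) r) := by
    funext r i; exact pvBodyA src dictL find_all r i
  rw [hbody, pvFoldl_blocks]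
  have hrange : PySem.List.pyRange 0 ((src.length : Int) + 1) 1
      = List.map (fun k : Nat => (k : Int)) (List.range (src.length + 1)) := by
    have h : ((src.length : Int) + 1) = ((src.length + 1 : Nat) : Int) := by norm_cast
    rw [h]
    exact PySem.List.pyRange_zero_natCast (src.length + 1)
  rw [hrange, List.flatMap_map, pvFoldl_ite_add]
  have hempty : (PySem.Set.empty : PySem.Set (List Char)) = [] := rfl
  rw [hempty, ← PySem.Set.ofList_eq_foldl]
  refine congrArg PySem.Set.ofList ?_
  -- the two filtered candidate streams coincide
  have hp : (fun w => decide (w ≠ src) && (find_all || decide (w ∈ dictL))) src = false := by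
    simp
  calc ((List.range (src.length + 1)).flatMap (fun k : Nat => pvEditsA src (k : Int))).filter
          (fun t => decide (pvKeep src dictL find_all t))
      = ((List.range (src.length + 1)).flatMap (fun k : Nat => pvEditsA src (k : Int))).filter
          (fun w => decide (w ≠ src) && (find_all || decide (w ∈ dictL))) := by
        exact List.filter_congr (fun w _ => (pvFilter_cond src dictL find_all w).symm)
    _ = (List.range (src.length + 1)).flatMap
          (fun k : Nat => (pvEditsA src (k : Int)).filter
            (fun w => decide (w ≠ src) && (find_all || decide (w ∈ dictL)))) := by
        rw [List.filter_flatMap]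
    _ = (List.range (src.length + 1)).flatMap
          (fun k : Nat => ((pvHeadEdits (src.drop k) (decide (1 < src.length))).map
              (fun e => src.take k ++ e)).filter
            (fun w => decide (w ≠ src) && (find_all || decide (w ∈ dictL)))) := by
        refine List.flatMap_congr (fun k hk => ?_)
        exact pvEditsA_filter_eq src k (Nat.lt_succ_iff.mp (List.mem_range.mp hk)) _ hp
    _ = (pvEdits1 [] src (decide (1 < src.length))).filter
          (fun w => decide (w ≠ src) && (find_all || decide (w ∈ dictL))) := by
        rw [pvEdits1_eq_flatMap, List.filter_flatMap]
        simp
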